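-- pv_equiv track=rewrite | github.com/Gretoad/tkinter | tklabv2.py | my_map
-- ===== SOURCE A (Python) =====
-- def my_map(size):
--     tab = []
--     inc = []
--     for y in range(size):
--         lgn = []
--         for x in range(size):
--             if x%2==0 and y%2==0:
--                 lgn.append(0)
--                 inc.append((x, y))
--             else:
--                 lgn.append(-1)
--         tab.append(lgn)
--     return tab, inc
-- ===== SOURCE B (Python) =====
-- def my_map(size):
--     # Tile the grid from a 2-row template (even row pattern [0,-1] repeated,
--     # odd row all -1) instead of testing parity per cell; cross the even
--     # coordinate list with itself for inc.
--     half = (size + 1) // 2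
--     evens = list(range(0, size, 2))
--     even_row = ([0, -1] * half)[:size]
--     odd_row = [-1] * size
--     tab = [row[:] for row in ([even_row, odd_row] * half)[:size]]
--     inc = [(x, y) for y in evens for x in evens]
--     return tab, inc
-- ===== Notes on version B (the rewrite author's own statement) =====
-- stated objective: alternative
-- what changed: B replaces the per-cell parity-testing scan by tiling: it builds one even template row as the pattern [0,-1] repeated and cut to size and an all--1 odd row, repeats the two-row block and cuts it to size for the grid, and forms inc as the cross product of the even-coordinate list with itself.
import Mathlib
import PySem

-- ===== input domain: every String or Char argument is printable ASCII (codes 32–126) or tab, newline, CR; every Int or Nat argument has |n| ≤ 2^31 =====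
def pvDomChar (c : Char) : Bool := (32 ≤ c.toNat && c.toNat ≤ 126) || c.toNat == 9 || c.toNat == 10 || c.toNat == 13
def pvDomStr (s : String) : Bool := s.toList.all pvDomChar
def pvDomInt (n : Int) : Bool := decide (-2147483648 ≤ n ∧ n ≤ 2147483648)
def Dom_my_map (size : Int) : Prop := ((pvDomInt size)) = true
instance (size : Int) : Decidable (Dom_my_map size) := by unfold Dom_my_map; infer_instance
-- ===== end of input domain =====

-- B tiles the grid out of a prebuilt 2-row template ([0,-1] repeated / all -1, rows
-- repeated and cut to size) and crosses the even-coordinate list with itself,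
-- instead of A's interleaved per-cell parity-testing scan.

-- ===== PORT A =====
-- Python's list.append is an O(1) dynamic-array push: the accumulators are Arrays
-- (same loops, same branches, same state), converted to lists at the return.
def my_map (size : Int) : List (List Int) × (List (Int × Int)) :=
  let r := (PySem.List.pyRange 0 size 1).foldl
    (fun (st : Array (List Int) × Array (Int × Int)) y =>
      let inner := (PySem.List.pyRange 0 size 1).foldl
        (fun (st2 : Array Int × Array (Int × Int)) x =>
          if PySem.Int.mod x 2 == 0 && PySem.Int.mod y 2 == 0 then
            (st2.1.push 0, st2.2.push (x, y))
          else
            (st2.1.push (-1), st2.2))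
        (#[], st.2)
      (st.1.push inner.1.toList, inner.2))
    (#[], #[])
  (r.1.toList, r.2.toList)

-- ===== PORT B =====
def my_map_alt (size : Int) : List (List Int) × (List (Int × Int)) :=
  let half := PySem.Int.floordiv (size + 1) 2
  let evens := PySem.List.pyRange 0 size 2
  let even_row := PySem.List.slice (PySem.List.pyRepeat [(0 : Int), -1] half) none (some size)
  let odd_row := PySem.List.pyRepeat [(-1 : Int)] size
  let tab := (PySem.List.slice (PySem.List.pyRepeat [even_row, odd_row] half) none (some size)).map
               (fun row => PySem.List.slice row none none)   -- row[:] : a copy, identity on the value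
  let inc := evens.flatMap (fun y => evens.map (fun x => (x, y)))
  (tab, inc)

-- ===== PRECONDITION & SPEC =====
def Spec_my_map (size : Int) (out : List (List Int) × (List (Int × Int))) : Prop := out = my_map_alt size
instance (size : Int) (out : List (List Int) × (List (Int × Int))) : Decidable (Spec_my_map size out) := by unfold Spec_my_map; infer_instance

-- ===== CLAIM (what is proved, stated in full; the proofs are below) =====
def Claim_equal_my_map : Prop := ∀ (size : Int), Dom_my_map size → Spec_my_map size (my_map size)

-- ===== LEMMAS AND PROOFS =====

-- Python's x % 2 agrees with Lean's Int.emod for the positive modulus 2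
theorem pv_mod2 (x : Int) : PySem.Int.mod x 2 = x % 2 := by
  simp [PySem.Int.mod, Int.fmod_eq_emod]

-- range m filtered to evens is the step-2 range, over Nat
theorem pv_range_filter_even (m : Nat) :
    (List.range m).filter (fun k => k % 2 == 0) = (List.range ((m + 1) / 2)).map (fun k => 2 * k) := by
  induction m with
  | zero => simp
  | succ m ih =>
    rw [List.range_succ, List.filter_append, ih]
    by_cases h : m % 2 = 0
    · have h2 : (m + 1 + 1) / 2 = (m + 1) / 2 + 1 := by omega
      have h3 : 2 * ((m + 1) / 2) = m := by omega
      rw [h2, List.range_succ, List.map_append]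
      simp [h, h3]
    · have h2 : (m + 1 + 1) / 2 = (m + 1) / 2 := by omega
      rw [h2]
      simp [h]

-- the evens of range(0, n, 1) are exactly range(0, n, 2)
theorem pv_filter_even_pyRange (n : Int) :
    (PySem.List.pyRange 0 n 1).filter (fun x => x % 2 == 0) = PySem.List.pyRange 0 n 2 := by
  rw [PySem.List.pyRange_one, PySem.List.pyRange_of_pos 0 n (by norm_num : (0:Int) < 2)]
  simp only [zero_add, sub_zero]
  rw [List.filter_map]
  have hfun : ((fun x : Int => x % 2 == 0) ∘ (fun k : Nat => (k : Int))) = (fun k : Nat => k % 2 == 0) := by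
    funext k
    simp only [Function.comp]
    rw [Bool.eq_iff_iff]
    simp
    omega
  rw [hfun, pv_range_filter_even]
  by_cases hn : 0 < n
  · rw [if_pos hn]
    have h3 : ((n.toNat + 1) / 2) = ((n + 2 - 1) / 2).toNat := by omega
    rw [h3, List.map_map]
    congr 1
  · have h1 : n.toNat = 0 := by omega
    rw [if_neg (by omega), h1]
    simp

-- the inner x-loop of A appends the comprehension row and, if y is even, the even x's paired with y
theorem pv_inner (y : Int) (L : List Int) (lgn : Array Int) (inc : Array (Int × Int)) :
    L.foldl
      (fun (st2 : Array Int × Array (Int × Int)) x =>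
        if x % 2 == 0 && y % 2 == 0 then
          (st2.1.push 0, st2.2.push (x, y))
        else
          (st2.1.push (-1), st2.2))
      (lgn, inc)
    = ((lgn.toList ++ L.map (fun x => if x % 2 == 0 && y % 2 == 0 then 0 else -1)).toArray,
       (inc.toList ++ if y % 2 == 0 then
                (L.filter (fun x => x % 2 == 0)).map (fun x => (x, y))
              else ([] : List (Int × Int))).toArray) := by
  induction L generalizing lgn inc with
  | nil =>
    cases hy : (y % 2 == 0) <;> simp
  | cons x L ih =>
    simp only [List.foldl_cons]
    by_cases h : (x % 2 == 0 && y % 2 == 0) = true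
    · rw [if_pos h, ih]
      rcases Bool.and_eq_true_iff.mp h with ⟨hx, hy⟩
      have hx' : x % 2 = 0 := by simpa using hx
      have hy' : y % 2 = 0 := by simpa using hy
      have hdx : 2 ∣ x := by omega
      simp [hx', hy', hdx, List.append_assoc]
    · rw [if_neg h, ih]
      by_cases hy : (y % 2 == 0) = true
      · have hx : (x % 2 == 0) = false := by
          cases hxx : (x % 2 == 0) <;> simp_all
        have hx' : x % 2 = 1 := by
          have := Int.emod_two_eq x; simp at hx; omega
        have hy' : y % 2 = 0 := by simpa using hy
        have hdx : ¬ (2 ∣ x) := by omega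
        simp [hx', hy', hdx, List.append_assoc]
      · have hy' : y % 2 = 1 := by
          have := Int.emod_two_eq y; simp at hy; omega
        simp [hy', List.append_assoc]

-- the outer y-loop of A, over an arbitrary list of y's
theorem pv_outer (size : Int) (L : List Int) (tab : Array (List Int)) (inc : Array (Int × Int)) :
    L.foldl
      (fun (st : Array (List Int) × Array (Int × Int)) y =>
        let inner := (PySem.List.pyRange 0 size 1).foldl
          (fun (st2 : Array Int × Array (Int × Int)) x =>
            if x % 2 == 0 && y % 2 == 0 then
              (st2.1.push 0, st2.2.push (x, y))
            else
              (st2.1.push (-1), st2.2))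
          (#[], st.2)
        (st.1.push inner.1.toList, inner.2))
      (tab, inc)
    = ((tab.toList ++ L.map (fun y => (PySem.List.pyRange 0 size 1).map
          (fun x => if x % 2 == 0 && y % 2 == 0 then 0 else -1))).toArray,
       (inc.toList ++ (L.filter (fun y => y % 2 == 0)).flatMap
          (fun y => (PySem.List.pyRange 0 size 2).map (fun x => (x, y)))).toArray) := by
  induction L generalizing tab inc with
  | nil => simp
  | cons y L ih =>
    simp only [List.foldl_cons]
    rw [pv_inner]
    by_cases hy : (y % 2 == 0) = true
    · rw [if_pos hy, ih]
      simp only [List.map_cons, List.filter_cons, if_pos hy, List.flatMap_cons,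
        pv_filter_even_pyRange, List.nil_append]
      simp [List.append_assoc]
    · rw [if_neg hy, ih]
      have hy' : (y % 2 == 0) = false := by
        cases hyy : (y % 2 == 0) <;> simp_all
      simp only [List.map_cons, List.filter_cons, hy', List.append_nil]
      simp [List.append_assoc]

-- n copies of a singleton flatten to a replicate (used for the all--1 odd row)
theorem pv_flatten_singleton {α : Type} (a : α) (n : Nat) :
    (List.replicate n [a]).flatten = List.replicate n a := by
  induction n with
  | zero => simp
  | succ n ih => simp [List.replicate_succ, ih]

-- tiling: k copies of a 2-element block, flattened, is the parity-indexed comprehension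
theorem pv_tile2 {α : Type} (a b : α) (k : Nat) :
    (List.replicate k [a, b]).flatten
      = (List.range (2 * k)).map (fun i => if i % 2 = 0 then a else b) := by
  induction k with
  | zero => simp
  | succ k ih =>
    rw [List.replicate_succ', List.flatten_append, ih]
    have h1 : 2 * (k + 1) = (2 * k + 1) + 1 := by ring
    rw [h1, List.range_succ, List.range_succ, List.map_append, List.map_append]
    have he : (2 * k) % 2 = 0 := by omega
    have ho : (2 * k + 1) % 2 = 1 := by omega
    simp [he, ho]

-- a tiled-and-cut list equals the parity comprehension over range n, when 2*k covers n
theorem pv_tile2_take {α : Type} (a b : α) (k n : Nat) (h : n ≤ 2 * k) :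
    ((List.replicate k [a, b]).flatten).take n
      = (List.range n).map (fun i => if i % 2 = 0 then a else b) := by
  rw [pv_tile2, ← List.map_take, List.take_range]
  congr 2
  omega

-- the half count of B covers size: for 0 ≤ size, half.toNat = (size.toNat + 1) / 2
theorem pv_half (size : Int) (h : 0 ≤ size) :
    (PySem.Int.floordiv (size + 1) 2).toNat = (size.toNat + 1) / 2 := by
  rw [PySem.Int.floordiv_eq_ediv_of_pos (by norm_num)]
  omega

-- ===== VERDICT (by name: the statement is the Claim_ definition above) =====
theorem my_map_spec : Claim_equal_my_map := by
  intro size _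
  unfold Spec_my_map my_map my_map_alt
  simp only [pv_mod2]
  rw [pv_outer]
  simp only [List.nil_append, pv_filter_even_pyRange]
  by_cases hs : 0 ≤ size
  · -- inc components agree literally; tab: tiling = comprehension
    refine Prod.ext ?_ rfl
    show _ = (PySem.List.slice (PySem.List.pyRepeat _ _) none (some size)).map _
    unfold PySem.List.pyRepeat
    rw [PySem.List.slice_to _ hs, pv_half size hs,
        pv_tile2_take _ _ _ size.toNat (by omega)]
    simp only [PySem.List.slice_none_none, List.map_map]
    rw [PySem.List.pyRange_one 0 size]
    simp only [zero_add, sub_zero, List.map_map]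
    refine List.map_congr_left ?_
    intro i hi
    simp only [Function.comp_apply]
    by_cases hp : i % 2 = 0
    · -- even row: the [0,-1] tile cut to size
      have hip : ((i : Int)) % 2 = 0 := by omega
      rw [if_pos hp]
      rw [PySem.List.slice_to _ hs, pv_tile2_take _ _ _ size.toNat (by omega)]
      refine (List.map_congr_left ?_).symm
      intro j hj
      by_cases hq : j % 2 = 0
      · have : ((j : Int)) % 2 = 0 := by omega
        simp [hq, this, hip]
      · have hj2 : ((j : Int)) % 2 ≠ 0 := by omega
        simp [hq]
        intro hd
        omega
    · -- odd row: all -1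
      have hip : ((i : Int)) % 2 ≠ 0 := by omega
      rw [if_neg hp, pv_flatten_singleton]
      refine List.eq_replicate_iff.mpr ⟨by simp, ?_⟩
      intro b hb
      rcases List.mem_map.mp hb with ⟨j, _, rfl⟩
      simp [hip]
  · -- size < 0 : everything is empty
    have h0 : PySem.List.pyRange 0 size 1 = [] := PySem.List.pyRange_one_eq_nil (by omega)
    have h2 : PySem.List.pyRange 0 size 2 = [] := by
      rw [PySem.List.pyRange_of_pos 0 size (by norm_num)]
      have : ((size + 2 - 1) / 2).toNat = 0 := by omega
      simp [this]
    have hh : (PySem.Int.floordiv (size + 1) 2).toNat = 0 := by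
      rw [PySem.Int.floordiv_eq_ediv_of_pos (by norm_num)]
      omega
    simp [h0, h2, PySem.List.pyRepeat, PySem.List.slice]
    omega
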